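-- pv_equiv track=rewrite | github.com/dhineshprabakaran96/GCP-vertexEmbeddings | bmc-bot-app/main.py | construt_prompt
-- ===== SOURCE A (Python) =====
-- MAX_INPUT_TOKENS = 4000
--
-- def construt_prompt(rows, question):
--
--   header = """Answer the query as truthfully as possible only using the provided context. The answer should be in JSON format which contains answer (the answer to user\'s query), id (ID of the point in the context from where the information was taken), and topic (topic from context). If the answer is not contained within the text below, return answer as \'NA\' and \'id\' and \'topic\' as most relevant in context. Provide necessary links to the supporting documents (if present in the context).
--
-- Context:-\n
-- """
--
--   context = ""
--   tokens_till_now = 0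
--   for row in rows:
--     if tokens_till_now > MAX_INPUT_TOKENS:
--       break
--     context += f"*Topic: {row[2]}\nID: {row[1]}\n{row[0]}\n\n"
--     tokens_till_now += row[3]
--
--   examples = """input: What is Tensorflow?
-- output: {\"answer\" : \"NA\", \"id\": \"\", \"topic\": \"\"}
--
-- input: What is Sharepoint?
-- output: {\"answer\" : \"NA\", \"id\": \"KBA00527160\", \"topic\": \"SharePoint Support Information\"}
--
-- input: How to install webex in mobile?
-- output: {\"answer\" : \"Corporate Mobile:  Note: The Webex App should be installed by default on all Corporate and Intune-managed devices. If you need to re-install the app, follow the below steps:\\n 1. Open the Corporate App Store application in the mobile device.\\n 2. Enter \'Webex\' in the search bar.\\n 3. Click \'Search\'.\\n  4. Select \'Webex\' application.\\n 5. Click \'Install\'.   Personal Mobile:  Webex application can be downloaded from iPhone App store / Google Play store available in their device.\", \"id\": \"KBA00520474\", \"topic\": \"Webex in Mobile Support Information\"}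
--
-- """
--
--   footer = f"input: {question}\noutput: \n"
--
--   return header + context + examples + footer
-- ===== SOURCE B (Python) =====
-- MAX_INPUT_TOKENS = 4000
--
-- HEADER = """Answer the query as truthfully as possible only using the provided context. The answer should be in JSON format which contains answer (the answer to user\'s query), id (ID of the point in the context from where the information was taken), and topic (topic from context). If the answer is not contained within the text below, return answer as \'NA\' and \'id\' and \'topic\' as most relevant in context. Provide necessary links to the supporting documents (if present in the context).
--
-- Context:-\n
-- """
--
-- EXAMPLES = """input: What is Tensorflow?
-- output: {\"answer\" : \"NA\", \"id\": \"\", \"topic\": \"\"}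
--
-- input: What is Sharepoint?
-- output: {\"answer\" : \"NA\", \"id\": \"KBA00527160\", \"topic\": \"SharePoint Support Information\"}
--
-- input: How to install webex in mobile?
-- output: {\"answer\" : \"Corporate Mobile:  Note: The Webex App should be installed by default on all Corporate and Intune-managed devices. If you need to re-install the app, follow the below steps:\\n 1. Open the Corporate App Store application in the mobile device.\\n 2. Enter \'Webex\' in the search bar.\\n 3. Click \'Search\'.\\n  4. Select \'Webex\' application.\\n 5. Click \'Install\'.   Personal Mobile:  Webex application can be downloaded from iPhone App store / Google Play store available in their device.\", \"id\": \"KBA00520474\", \"topic\": \"Webex in Mobile Support Information\"}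
--
-- """
--
--
-- def _selected(rows):
--   # exclusive prefix sums of the per-row token counts: 0, t0, t0+t1, ...
--   starts = [0]
--   for r in rows:
--     starts.append(starts[-1] + r[3])
--   # take rows while their exclusive prefix sum is within the budget (stop at first excess)
--   sel = []
--   for row, start in zip(rows, starts):
--     if start > MAX_INPUT_TOKENS:
--       break
--     sel.append(row)
--   return sel
--
--
-- def construt_prompt(rows, question):
--   pieces = [HEADER]
--   pieces.extend("".join(["*Topic: ", r[2], "\nID: ", r[1], "\n", r[0], "\n\n"])
--                 for r in _selected(rows))
--   pieces.append(EXAMPLES)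
--   pieces.append("".join(["input: ", question, "\noutput: \n"]))
--   return "".join(pieces)
-- ===== Notes on version B (the rewrite author's own statement) =====
-- stated objective: alternative
-- what changed: A interleaves string accumulation with a running token sum and a break in one loop; B stages the work: it builds the exclusive prefix sums of the token counts, take-whiles the zipped rows against the budget, then joins a flat list of pieces (header, formatted rows, examples, footer) in one final join.
import Mathlib
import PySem

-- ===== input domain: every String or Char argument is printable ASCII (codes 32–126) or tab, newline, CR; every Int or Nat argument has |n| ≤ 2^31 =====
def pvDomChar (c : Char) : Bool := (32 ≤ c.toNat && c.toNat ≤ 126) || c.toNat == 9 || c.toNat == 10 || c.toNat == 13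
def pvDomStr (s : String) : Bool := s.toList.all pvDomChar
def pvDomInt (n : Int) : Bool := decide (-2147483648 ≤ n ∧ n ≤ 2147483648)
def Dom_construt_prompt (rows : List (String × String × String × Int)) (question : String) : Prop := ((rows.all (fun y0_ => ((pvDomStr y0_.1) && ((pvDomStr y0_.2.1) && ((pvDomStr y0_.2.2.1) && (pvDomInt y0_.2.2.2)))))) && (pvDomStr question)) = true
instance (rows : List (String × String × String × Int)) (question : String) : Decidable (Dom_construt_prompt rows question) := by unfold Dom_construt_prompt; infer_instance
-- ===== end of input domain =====

-- B replaces A's single loop (interleaved string accumulation + running token sum + break) by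
-- staged passes: exclusive prefix sums of the token counts, a take-while of the zipped rows
-- against the budget, then one flat join of all pieces; objective: alternative decomposition.

-- shared string literals of the module (identical literal text in A and in B)
def pvHeader : String := "Answer the query as truthfully as possible only using the provided context. The answer should be in JSON format which contains answer (the answer to user's query), id (ID of the point in the context from where the information was taken), and topic (topic from context). If the answer is not contained within the text below, return answer as 'NA' and 'id' and 'topic' as most relevant in context. Provide necessary links to the supporting documents (if present in the context).\n\nContext:-\n\n"

def pvExamples : String := "input: What is Tensorflow?\noutput: {\"answer\" : \"NA\", \"id\": \"\", \"topic\": \"\"}\n\ninput: What is Sharepoint?\noutput: {\"answer\" : \"NA\", \"id\": \"KBA00527160\", \"topic\": \"SharePoint Support Information\"}\n\ninput: How to install webex in mobile?\noutput: {\"answer\" : \"Corporate Mobile:  Note: The Webex App should be installed by default on all Corporate and Intune-managed devices. If you need to re-install the app, follow the below steps:\\n 1. Open the Corporate App Store application in the mobile device.\\n 2. Enter 'Webex' in the search bar.\\n 3. Click 'Search'.\\n  4. Select 'Webex' application.\\n 5. Click 'Install'.   Personal Mobile:  Webex application can be downloaded from iPhone App store / Google Play store available in their device.\", \"id\": \"KBA00520474\",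 \"topic\": \"Webex in Mobile Support Information\"}\n\n"

-- ===== PORT A =====
-- A's f"*Topic: {row[2]}\nID: {row[1]}\n{row[0]}\n\n"
def pvFmtA (row : String × String × String × Int) : String :=
  "*Topic: " ++ row.2.2.1 ++ "\nID: " ++ row.2.1 ++ "\n" ++ row.1 ++ "\n\n"

-- A's for-loop: state (context, tokens_till_now); break when tokens_till_now > 4000
def pvLoopA (rows : List (String × String × String × Int)) (context : String) (tokens : Int) : String :=
  match rows with
  | [] => context
  | row :: rest =>
    if tokens > 4000 then context
    else pvLoopA rest (context ++ pvFmtA row) (tokens + row.2.2.2)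

def construt_prompt (rows : List (String × String × String × Int)) (question : String) : String :=
  pvHeader ++ pvLoopA rows "" 0 ++ pvExamples ++ ("input: " ++ question ++ "\noutput: \n")

-- ===== PORT B =====
-- B's starts list: starts = [0]; for r in rows: starts.append(starts[-1] + r[3])
def pvStarts (rows : List (String × String × String × Int)) (last : Int) : List Int :=
  match rows with
  | [] => [last]
  | r :: rest => last :: pvStarts rest (last + r.2.2.2)

-- B's second loop: keep rows while their exclusive prefix sum is within budget, break at excess
def pvSel (pairs : List ((String × String × String × Int) × Int)) :
    List (String × String × String × Int) :=
  match pairs with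
  | [] => []
  | (row, start) :: rest => if start > 4000 then [] else row :: pvSel rest

-- B's "".join(["*Topic: ", r[2], "\nID: ", r[1], "\n", r[0], "\n\n"])
def pvFmtB (r : String × String × String × Int) : String :=
  String.join ["*Topic: ", r.2.2.1, "\nID: ", r.2.1, "\n", r.1, "\n\n"]

def construt_prompt_alt (rows : List (String × String × String × Int)) (question : String) : String :=
  String.join
    ([pvHeader]
      ++ (pvSel (rows.zip (pvStarts rows 0))).map pvFmtB
      ++ [pvExamples, String.join ["input: ", question, "\noutput: \n"]])

-- ===== PRECONDITION & SPEC =====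
def Spec_construt_prompt (rows : List (String × String × String × Int)) (question : String) (out : String) : Prop := out = construt_prompt_alt rows question
instance (rows : List (String × String × String × Int)) (question : String) (out : String) : Decidable (Spec_construt_prompt rows question out) := by unfold Spec_construt_prompt; infer_instance

-- ===== CLAIM (what is proved, stated in full; the proofs are below) =====
def Claim_equal_construt_prompt : Prop := ∀ (rows : List (String × String × String × Int)) (question : String), Dom_construt_prompt rows question → Spec_construt_prompt rows question (construt_prompt rows question)

-- ===== LEMMAS AND PROOFS =====
theorem pv_foldl_append (l : List String) (a : String) :
    l.foldl (· ++ ·) a = a ++ l.foldl (· ++ ·) "" := by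
  induction l generalizing a with
  | nil => simp
  | cons s t ih => simp only [List.foldl_cons]; rw [ih, ih ("" ++ s)]; simp [String.append_assoc]

theorem pv_join_cons (s : String) (l : List String) :
    String.join (s :: l) = s ++ String.join l := by
  simp only [String.join, List.foldl_cons]
  rw [pv_foldl_append]; simp

theorem pv_join_append (a b : List String) :
    String.join (a ++ b) = String.join a ++ String.join b := by
  induction a with
  | nil => simp [String.join]
  | cons s t ih => simp only [List.cons_append, pv_join_cons, ih, String.append_assoc]

theorem pv_join_nil : String.join [] = "" := rfl

theorem pv_fmt_eq (r : String × String × String × Int) : pvFmtA r = pvFmtB r := by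
  simp [pvFmtA, pvFmtB, pv_join_cons, pv_join_nil, String.append_assoc]

-- A's accumulator loop equals the join of B's selected, formatted rows.
theorem pvLoopA_eq (rows : List (String × String × String × Int)) :
    ∀ (context : String) (tokens : Int),
      pvLoopA rows context tokens
        = context ++ String.join ((pvSel (rows.zip (pvStarts rows tokens))).map pvFmtB) := by
  induction rows with
  | nil => intro context tokens; simp [pvLoopA, pvStarts, pvSel, String.join]
  | cons row rest ih =>
    intro context tokens
    by_cases h : tokens > 4000
    · simp [pvLoopA, pvStarts, pvSel, h, String.join]
    · simp only [pvLoopA, pvStarts, List.zip_cons_cons, pvSel, h, if_false]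
      rw [ih]
      simp [List.map_cons, pv_join_cons, pv_fmt_eq, String.append_assoc]

-- ===== VERDICT (by name: the statement is the Claim_ definition above) =====
theorem construt_prompt_spec : Claim_equal_construt_prompt := by
  intro rows question _
  unfold Spec_construt_prompt construt_prompt construt_prompt_alt
  rw [pvLoopA_eq, pv_join_append, pv_join_append]
  simp [pv_join_cons, pv_join_nil, String.append_assoc]
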